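-- pv_equiv track=rewrite | github.com/kqdtran/ADA1 | two_sum/two_sum.py | findNumTwoSum
-- ===== SOURCE A (Python) =====
-- def findNumTwoSum(dic):
--     """Compute the number of target values t in the interval [2500,4000] (inclusive)
--     such that there are distinct numbers x, y in the input file that satisfy x+y=t.
--
--     Input: dic - a hash table contains all the numbers in the input file"""
--
--     numSatisfied = 0 # the number of target values that passed the requirement
--     for target in range(2500, 4001): # [2500, 4000]
--         for x in dic:
--             y = target - x
--             if y in dic and y != x: # ensure dictinctness
--                 numSatisfied += 1
--                 break
--     return numSatisfied
-- ===== SOURCE B (Python) =====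
-- def findNumTwoSum(dic):
--     # Build the set of all achievable pair sums inside [2500, 4000] once,
--     # then return its size (each distinct sum is one satisfied target).
--     sums = set()
--     for x in dic:
--         for y in dic:
--             if y != x and 2500 <= x + y <= 4000:
--                 sums.add(x + y)
--     return len(sums)
-- ===== Notes on version B (the rewrite author's own statement) =====
-- stated objective: alternative
-- what changed: Instead of scanning all 1501 targets with an inner membership loop and break, B enumerates key pairs once, collects the distinct in-range pair sums into a set, and returns its size.
import Mathlib
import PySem

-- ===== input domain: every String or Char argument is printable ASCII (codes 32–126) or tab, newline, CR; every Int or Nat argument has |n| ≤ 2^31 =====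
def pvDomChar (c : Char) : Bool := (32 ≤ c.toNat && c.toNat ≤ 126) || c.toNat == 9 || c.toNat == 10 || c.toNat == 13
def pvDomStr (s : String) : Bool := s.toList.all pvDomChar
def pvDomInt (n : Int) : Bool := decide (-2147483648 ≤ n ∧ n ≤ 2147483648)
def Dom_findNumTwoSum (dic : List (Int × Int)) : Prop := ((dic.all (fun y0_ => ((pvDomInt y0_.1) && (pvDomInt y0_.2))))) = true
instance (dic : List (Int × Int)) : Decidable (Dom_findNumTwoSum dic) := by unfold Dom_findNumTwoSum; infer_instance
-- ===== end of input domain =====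

-- B replaces A's target-by-target scan (with an inner break loop) by one pass over key
-- pairs that collects the distinct in-range pair sums into a set and returns its size.

-- ===== PORT A =====
-- inner 'for x in dic: … break' loop: returns true iff some key x has target-x a key ≠ x
def pvAnyA (keys : List Int) (target : Int) : List Int → Bool
  | [] => false
  | x :: rest =>
      let y := target - x
      if keys.contains y && y != x then true else pvAnyA keys target rest

def findNumTwoSum (dic : List (Int × Int)) : Int :=
  let keys := dic.map Prod.fst
  (PySem.List.pyRange 2500 4001 1).foldl
    (fun numSatisfied target =>
      if pvAnyA keys target keys then numSatisfied + 1 else numSatisfied) 0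

-- ===== PORT B =====
def findNumTwoSum_alt (dic : List (Int × Int)) : Int :=
  let keys := dic.map Prod.fst
  let sums : PySem.Set Int :=
    keys.foldl (fun s x =>
      keys.foldl (fun s y =>
        if y != x && (2500 ≤ x + y && x + y ≤ 4000) then PySem.Set.add s (x + y) else s) s)
      PySem.Set.empty
  PySem.Set.len sums

-- ===== PRECONDITION & SPEC =====
def Spec_findNumTwoSum (dic : List (Int × Int)) (out : Int) : Prop := out = findNumTwoSum_alt dic
instance (dic : List (Int × Int)) (out : Int) : Decidable (Spec_findNumTwoSum dic out) := by unfold Spec_findNumTwoSum; infer_instance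

-- ===== CLAIM (what is proved, stated in full; the proofs are below) =====
def Claim_equal_findNumTwoSum : Prop := ∀ (dic : List (Int × Int)), Dom_findNumTwoSum dic → Spec_findNumTwoSum dic (findNumTwoSum dic)

-- ===== LEMMAS AND PROOFS =====

theorem pvAnyA_iff (keys : List Int) (t : Int) (l : List Int) :
    pvAnyA keys t l = true ↔ ∃ x ∈ l, (t - x) ∈ keys ∧ t - x ≠ x := by
  induction l with
  | nil => simp [pvAnyA]
  | cons x rest ih =>
      simp only [pvAnyA, List.mem_cons]
      split_ifs with h
      · simp only [Bool.and_eq_true, List.contains_iff_mem, bne_iff_ne] at h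
        exact ⟨fun _ => ⟨x, Or.inl rfl, h⟩, fun _ => rfl⟩
      · simp only [Bool.and_eq_true, List.contains_iff_mem, bne_iff_ne, not_and_or] at h
        rw [ih]
        constructor
        · rintro ⟨z, hz, h1, h2⟩; exact ⟨z, Or.inr hz, h1, h2⟩
        · rintro ⟨z, hz | hz, h1, h2⟩
          · subst hz; rcases h with h | h <;> [exact absurd h1 h; exact absurd h2 h]
          · exact ⟨z, hz, h1, h2⟩

theorem mem_innerB (x t : Int) (l : List Int) (s : PySem.Set Int) :
    t ∈ l.foldl (fun s y =>
        if y != x && (2500 ≤ x + y && x + y ≤ 4000) then PySem.Set.add s (x + y) else s) s ↔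
      t ∈ s ∨ ∃ y ∈ l, (y ≠ x ∧ 2500 ≤ x + y ∧ x + y ≤ 4000) ∧ t = x + y := by
  induction l generalizing s with
  | nil => simp
  | cons y rest ih =>
      simp only [List.foldl_cons, List.mem_cons]
      rw [ih]
      split_ifs with h
      · simp only [Bool.and_eq_true, bne_iff_ne, decide_eq_true_eq] at h
        rw [PySem.Set.mem_add]
        constructor
        · rintro ((hs | rfl) | ⟨z, hz, hc, rfl⟩)
          · exact Or.inl hs
          · exact Or.inr ⟨y, Or.inl rfl, ⟨h.1, h.2.1, h.2.2⟩, rfl⟩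
          · exact Or.inr ⟨z, Or.inr hz, hc, rfl⟩
        · rintro (hs | ⟨z, hz | hz, hc, rfl⟩)
          · exact Or.inl (Or.inl hs)
          · subst hz; exact Or.inl (Or.inr rfl)
          · exact Or.inr ⟨z, hz, hc, rfl⟩
      · simp only [Bool.and_eq_true, bne_iff_ne, decide_eq_true_eq, not_and_or] at h
        constructor
        · rintro (hs | ⟨z, hz, hc, rfl⟩)
          · exact Or.inl hs
          · exact Or.inr ⟨z, Or.inr hz, hc, rfl⟩
        · rintro (hs | ⟨z, hz | hz, hc, rfl⟩)
          · exact Or.inl hs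
          · subst hz
            rcases h with h | h | h
            · exact absurd hc.1 h
            · exact absurd hc.2.1 h
            · exact absurd hc.2.2 h
          · exact Or.inr ⟨z, hz, hc, rfl⟩

theorem nodup_innerB (x : Int) (l : List Int) (s : PySem.Set Int)
    (hs : s.Nodup) :
    (l.foldl (fun s y =>
        if y != x && (2500 ≤ x + y && x + y ≤ 4000) then PySem.Set.add s (x + y) else s) s).Nodup := by
  induction l generalizing s with
  | nil => exact hs
  | cons y rest ih =>
      simp only [List.foldl_cons]
      split_ifs with h
      · exact ih _ (PySem.Set.nodup_add _ _ hs)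
      · exact ih _ hs

theorem mem_outerB (keys : List Int) (t : Int) (l : List Int) (s : PySem.Set Int) :
    t ∈ l.foldl (fun s x =>
        keys.foldl (fun s y =>
          if y != x && (2500 ≤ x + y && x + y ≤ 4000) then PySem.Set.add s (x + y) else s) s) s ↔
      t ∈ s ∨ ∃ x ∈ l, ∃ y ∈ keys, (y ≠ x ∧ 2500 ≤ x + y ∧ x + y ≤ 4000) ∧ t = x + y := by
  induction l generalizing s with
  | nil => simp
  | cons x rest ih =>
      simp only [List.foldl_cons, List.mem_cons]
      rw [ih]
      rw [mem_innerB x t keys s]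
      constructor
      · rintro ((hs | ⟨y, hy, hc, rfl⟩) | ⟨z, hz, w, hw, hc, rfl⟩)
        · exact Or.inl hs
        · exact Or.inr ⟨x, Or.inl rfl, y, hy, hc, rfl⟩
        · exact Or.inr ⟨z, Or.inr hz, w, hw, hc, rfl⟩
      · rintro (hs | ⟨z, hz | hz, w, hw, hc, rfl⟩)
        · exact Or.inl (Or.inl hs)
        · subst hz; exact Or.inl (Or.inr ⟨w, hw, hc, rfl⟩)
        · exact Or.inr ⟨z, hz, w, hw, hc, rfl⟩

theorem nodup_outerB (keys : List Int) (l : List Int) (s : PySem.Set Int) (hs : s.Nodup) :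
    (l.foldl (fun s x =>
        keys.foldl (fun s y =>
          if y != x && (2500 ≤ x + y && x + y ≤ 4000) then PySem.Set.add s (x + y) else s) s) s).Nodup := by
  induction l generalizing s with
  | nil => exact hs
  | cons x rest ih => exact ih _ (nodup_innerB x keys s hs)

theorem findNumTwoSum_spec : Claim_equal_findNumTwoSum := by
  intro dic _
  unfold Spec_findNumTwoSum findNumTwoSum findNumTwoSum_alt
  set keys := dic.map Prod.fst with hk
  rw [PySem.List.foldl_if_add_one]
  rw [PySem.Set.len]
  rw [zero_add]
  rw [List.countP_eq_length_filter]
  rw [Nat.cast_inj]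
  apply List.Perm.length_eq
  rw [List.perm_ext_iff_of_nodup
    ((PySem.List.nodup_pyRange_one 2500 4001).filter _)
    (nodup_outerB keys keys PySem.Set.empty (List.nodup_nil))]
  intro t
  rw [List.mem_filter, PySem.List.mem_pyRange_one, pvAnyA_iff,
    mem_outerB keys t keys PySem.Set.empty]
  constructor
  · rintro ⟨⟨h1, h2⟩, x, hx, hy, hne⟩
    exact Or.inr ⟨x, hx, t - x, hy, ⟨hne, by omega, by omega⟩, by omega⟩
  · rintro (hs | ⟨x, hx, y, hy, ⟨hne, hb1, hb2⟩, rfl⟩)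
    · simp [PySem.Set.empty] at hs
    · refine ⟨⟨by omega, by omega⟩, x, hx, by simpa using hy, by omega⟩
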